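-- pv_equiv track=rewrite | github.com/ashley-bergsma/cs-guided-project-python-basics | src/demonstration_3.py | digitsManipulations
-- ===== SOURCE A (Python) =====
-- def digitsManipulations(n):
--     #cast the numbers to a string
--     # assign product variable starting at 1 (because the integer * itself would = 0)
--     # assign sum var
--     numbers = str(n)
--     numbers_product = 1
--     numbers_sum = 0
--     for number in numbers:
--         integer = int(number)
--         numbers_product *= integer
--         numbers_sum += integer
--     return numbers_product - numbers_sum
-- ===== SOURCE B (Python) =====
-- def digitsManipulations(n):
--     prod, s, m = 1, 0, abs(n)
--     while m > 9:
--         prod *= m % 10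
--         s += m % 10
--         m //= 10
--     return prod * m - (s + m)
-- ===== Notes on version B (the rewrite author's own statement) =====
-- stated objective: alternative
-- what changed: Replaces A's string conversion and per-character int() parsing with a pure arithmetic loop that peels digits off with modulus and floor division, folding the last digit directly into the final product/sum.
import Mathlib
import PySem

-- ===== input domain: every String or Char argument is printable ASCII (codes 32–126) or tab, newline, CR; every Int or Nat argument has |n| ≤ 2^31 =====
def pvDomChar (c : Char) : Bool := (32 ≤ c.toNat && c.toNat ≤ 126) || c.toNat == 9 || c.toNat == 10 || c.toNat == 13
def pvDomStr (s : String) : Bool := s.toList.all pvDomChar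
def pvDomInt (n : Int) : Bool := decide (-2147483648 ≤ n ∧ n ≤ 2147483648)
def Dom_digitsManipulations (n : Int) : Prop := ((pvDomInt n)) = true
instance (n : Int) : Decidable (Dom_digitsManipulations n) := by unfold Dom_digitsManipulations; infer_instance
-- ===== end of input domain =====

-- B replaces A's string conversion + per-character int() parsing by a pure arithmetic
-- digit-peeling loop (% 10 and // 10); proved equal to A for all n ≥ 0 (A raises ValueError on negatives).


-- ===== PORT A =====
-- one loop step: integer = int(number); numbers_product *= integer; numbers_sum += integer
-- (none = the ValueError int() raises on a non-digit character such as '-')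
def pvStepA (st : Option (Int × Int)) (c : Char) : Option (Int × Int) :=
  match st with
  | none => none
  | some (p, s) =>
    match PySem.Int.ofChars? [c] with
    | none => none
    | some i => some (p * i, s + i)

def digitsManipulations (n : Int) : Int :=
  match (PySem.Int.toStr n).toList.foldl pvStepA (some (1, 0)) with   -- numbers = str(n)
  | some (p, s) => p - s
  | none => 0   -- unreachable on Pre_: here Python raises ValueError

-- ===== PORT B =====
-- while m > 9: prod *= m % 10; s += m % 10; m //= 10   (returns final prod, s, m)
def pvLoopB (prod s m : Int) : Int × Int × Int :=
  if _h : 9 < m then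
    pvLoopB (prod * PySem.Int.mod m 10) (s + PySem.Int.mod m 10) (PySem.Int.floordiv m 10)
  else
    (prod, s, m)
termination_by m.toNat
decreasing_by
  rw [PySem.Int.floordiv_eq_ediv_of_pos (by omega : (0:Int) < 10)]
  omega

def digitsManipulations_alt (n : Int) : Int :=
  match pvLoopB 1 0 |n| with
  | (prod, s, m) => prod * m - (s + m)

-- ===== PRECONDITION & SPEC =====
-- Pre_ excludes exactly the negative inputs, on which A raises ValueError (int('-')).
def Pre_digitsManipulations (n : Int) : Prop := 0 ≤ n
instance (n : Int) : Decidable (Pre_digitsManipulations n) := by unfold Pre_digitsManipulations; infer_instance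
def pvWitness_digitsManipulations : Int := 123

def Spec_digitsManipulations (n : Int) (out : Int) : Prop := out = digitsManipulations_alt n
instance (n : Int) (out : Int) : Decidable (Spec_digitsManipulations n out) := by unfold Spec_digitsManipulations; infer_instance

-- ===== CLAIM (what is proved, stated in full; the proofs are below) =====
def Claim_equal_digitsManipulations : Prop := ∀ (n : Int), Dom_digitsManipulations n → Pre_digitsManipulations n → Spec_digitsManipulations n (digitsManipulations n)

-- ===== LEMMAS AND PROOFS =====

-- digit product and digit sum of a natural number (proof-side characterisation)
def pvDProd (m : Nat) : Int := if _h : m < 10 then (m : Int) else pvDProd (m / 10) * ((m % 10 : Nat) : Int)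
def pvDSum (m : Nat) : Int := if _h : m < 10 then (m : Int) else pvDSum (m / 10) + ((m % 10 : Nat) : Int)

-- fuel irrelevance for Nat.toDigitsCore
lemma pvCore_fuel (f1 : Nat) : ∀ (f2 m : Nat) (l : List Char), m < f1 → m < f2 →
    Nat.toDigitsCore 10 f1 m l = Nat.toDigitsCore 10 f2 m l := by
  induction f1 with
  | zero => omega
  | succ f1 ih =>
    intro f2 m l h1 h2
    cases f2 with
    | zero => omega
    | succ f2 =>
      simp only [Nat.toDigitsCore]
      by_cases hm : m / 10 = 0
      · simp [hm]
      · simp only [hm, if_false]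
        exact ih f2 (m / 10) _ (by omega) (by omega)

-- accumulator lemma for Nat.toDigitsCore
lemma pvCore_acc (f : Nat) : ∀ (m : Nat) (l : List Char),
    Nat.toDigitsCore 10 f m l = Nat.toDigitsCore 10 f m [] ++ l := by
  induction f with
  | zero => intro m l; simp [Nat.toDigitsCore]
  | succ f ih =>
    intro m l
    simp only [Nat.toDigitsCore]
    by_cases hm : m / 10 = 0
    · simp [hm]
    · simp only [hm, if_false]
      rw [ih (m / 10) [Nat.digitChar (m % 10)], ih (m / 10) (Nat.digitChar (m % 10) :: l)]
      simp

-- structural recursion for Nat.toDigits base 10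
lemma pvToDigits_small (m : Nat) (h : m < 10) : Nat.toDigits 10 m = [Nat.digitChar m] := by
  simp [Nat.toDigits, Nat.toDigitsCore, Nat.div_eq_of_lt h, Nat.mod_eq_of_lt h]

lemma pvToDigits_step (m : Nat) (h : ¬ m < 10) :
    Nat.toDigits 10 m = Nat.toDigits 10 (m / 10) ++ [Nat.digitChar (m % 10)] := by
  have hm : m / 10 ≠ 0 := by omega
  show Nat.toDigitsCore 10 (m + 1) m [] = Nat.toDigitsCore 10 (m / 10 + 1) (m / 10) [] ++ _
  conv_lhs => rw [Nat.toDigitsCore]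
  simp only [hm, if_false]
  rw [pvCore_fuel m (m / 10 + 1) (m / 10) _ (by omega) (by omega),
    pvCore_acc (m / 10 + 1) (m / 10)]

-- parsing a single digit character
lemma pvParse_digitChar (r : Nat) (h : r < 10) :
    PySem.Int.ofChars? [Nat.digitChar r] = some (r : Int) := by
  interval_cases r <;> decide

-- A-side loop characterisation
lemma pvFoldA (m : Nat) : ∀ (p s : Int),
    List.foldl pvStepA (some (p, s)) (Nat.toDigits 10 m) = some (p * pvDProd m, s + pvDSum m) := by
  induction m using Nat.strong_induction_on with
  | _ m ih =>
    intro p s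
    by_cases h : m < 10
    · rw [pvToDigits_small m h]
      have hp : pvDProd m = (m : Int) := by rw [pvDProd]; simp [h]
      have hs : pvDSum m = (m : Int) := by rw [pvDSum]; simp [h]
      simp [pvStepA, pvParse_digitChar m h, hp, hs]
    · have h10 : m % 10 < 10 := by omega
      have hp : pvDProd m = pvDProd (m / 10) * ((m % 10 : Nat) : Int) := by
        rw [pvDProd]; simp [h]
      have hs : pvDSum m = pvDSum (m / 10) + ((m % 10 : Nat) : Int) := by
        rw [pvDSum]; simp [h]
      rw [pvToDigits_step m h, List.foldl_append, ih (m / 10) (by omega) p s]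
      simp only [List.foldl_cons, List.foldl_nil, pvStepA, pvParse_digitChar _ h10, hp, hs]
      simp only [Option.some.injEq, Prod.mk.injEq]
      constructor <;> ring

-- B-side loop characterisation
lemma pvLoopB_spec (m : Nat) : ∀ (p s : Int),
    (pvLoopB p s (m : Int)).1 * (pvLoopB p s (m : Int)).2.2
      - ((pvLoopB p s (m : Int)).2.1 + (pvLoopB p s (m : Int)).2.2)
      = p * pvDProd m - (s + pvDSum m) := by
  induction m using Nat.strong_induction_on with
  | _ m ih =>
    intro p s
    by_cases h : m < 10
    · have h9 : ¬ (9:Int) < (m : Int) := by exact_mod_cast by omega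
      have hp : pvDProd m = (m : Int) := by rw [pvDProd]; simp [h]
      have hs : pvDSum m = (m : Int) := by rw [pvDSum]; simp [h]
      rw [pvLoopB]
      simp [h9, hp, hs]
    · have h9 : (9:Int) < (m : Int) := by exact_mod_cast by omega
      have hmod : PySem.Int.mod (m : Int) 10 = ((m % 10 : Nat) : Int) := by
        exact_mod_cast PySem.Int.mod_natCast m 10
      have hfd : PySem.Int.floordiv (m : Int) 10 = ((m / 10 : Nat) : Int) := by
        exact_mod_cast PySem.Int.floordiv_natCast m 10
      have hp : pvDProd m = pvDProd (m / 10) * ((m % 10 : Nat) : Int) := by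
        rw [pvDProd]; simp [h]
      have hs : pvDSum m = pvDSum (m / 10) + ((m % 10 : Nat) : Int) := by
        rw [pvDSum]; simp [h]
      rw [pvLoopB]
      simp only [h9, dite_true, hmod, hfd]
      rw [ih (m / 10) (by omega), hp, hs]
      ring

-- ===== VERDICT (by name: the statement is the Claim_ definition above) =====
theorem digitsManipulations_spec : Claim_equal_digitsManipulations := by
  intro n _ hpre
  unfold Spec_digitsManipulations digitsManipulations digitsManipulations_alt
  have hlt : ¬ n < 0 := Int.not_lt.mpr hpre
  have habs : |n| = ((n.toNat : Nat) : Int) := by rw [abs_of_nonneg hpre]; omega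
  have hchars : (PySem.Int.toStr n).toList = Nat.toDigits 10 n.toNat := by
    rw [PySem.Int.toList_toStr]
    simp [PySem.Int.toChars, hlt]
  rw [hchars, habs, pvFoldA n.toNat 1 0]
  have hb := pvLoopB_spec n.toNat 1 0
  rcases hr : pvLoopB 1 0 ((n.toNat : Nat) : Int) with ⟨prod, s, m⟩
  rw [hr] at hb
  simp only at hb ⊢
  rw [hb]
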